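-- pv_equiv track=rewrite | github.com/Ogulcan2005/Leren-programmeren | Python/challenge.py | generate_html_form
-- ===== SOURCE A (Python) =====
-- def generate_html_form(inputs):
--     html = "<form>\n"
--     for input_type, input_names in inputs.items():
--         if input_type == "text":
--             for name in input_names:
--                 html += f'<label for="{name}">{name.capitalize()}:</label>\n'
--                 html += f'<input type="text" id="{name}" name="{name}"><br>\n'
--         elif input_type == "password":
--             for name in input_names:
--                 html += f'<label for="{name}">{name.capitalize()}:</label>\n'
--                 html += f'<input type="password" id="{name}" name="{name}"><br>\n'
--         elif input_type == "email":
--             for name in input_names: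
--                 html += f'<label for="{name}">{name.capitalize()}:</label>\n'
--                 html += f'<input type="email" id="{name}" name="{name}"><br>\n'
--         elif input_type == "dropdown":
--             html += '<label for="dropdown">Choose a language:</label>\n'
--             html += '<select id="dropdown" name="language">\n'
--             for lang in input_names:
--                 html += f'<option value="{lang}">{lang}</option>\n'
--             html += '</select><br>\n'
--         elif input_type == "checkbox":
--             for name in input_names:
--                 html += f'<input type="checkbox" id="{name}" name="{name}">\n'
--                 html += f'<label for="{name}">{name.capitalize()}</label><br>\n'
--         elif input_type == "datepicker":
--             for name in input_names:
--                 html += f'<label for="{name}">{name.capitalize()}:</label>\n'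
--                 html += f'<input type="date" id="{name}" name="{name}"><br>\n'
--     html += '<input type="submit" value="Submit">\n</form>'
--     return html
-- ===== SOURCE B (Python) =====
-- # Two-stage "compile then serialize": the form spec is first compiled into a flat
-- # intermediate representation of generic HTML elements (tag, attribute list,
-- # optional inner text, trailing text), which a single generic serializer then
-- # renders; no per-type format strings, no string accumulation in the walk.
--
-- FIELD_TYPE = {"text": "text", "password": "password", "email": "email", "datepicker": "date"}
--
--
-- def _elem(tag, attrs, inner, trail):
--     s = "<" + tag + "".join(f' {k}="{v}"' for k, v in attrs) + ">"
--     if inner is not None: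
--         s += inner + "</" + tag + ">"
--     return s + trail
--
--
-- def _compile(inputs):
--     els = []
--     for t, names in inputs.items():
--         if t in FIELD_TYPE:
--             ht = FIELD_TYPE[t]
--             for n in names:
--                 els.append(("label", [("for", n)], n.capitalize() + ":", "\n"))
--                 els.append(("input", [("type", ht), ("id", n), ("name", n)], None, "<br>\n"))
--         elif t == "dropdown":
--             els.append(("label", [("for", "dropdown")], "Choose a language:", "\n"))
--             inner = "\n" + "".join(_elem("option", [("value", l)], l, "\n") for l in names)
--             els.append(("select", [("id", "dropdown"), ("name", "language")], inner, "<br>\n"))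
--         elif t == "checkbox":
--             for n in names:
--                 els.append(("input", [("type", "checkbox"), ("id", n), ("name", n)], None, "\n"))
--                 els.append(("label", [("for", n)], n.capitalize(), "<br>\n"))
--     els.append(("input", [("type", "submit"), ("value", "Submit")], None, "\n"))
--     return els
--
--
-- def generate_html_form(inputs):
--     return "<form>\n" + "".join(_elem(*e) for e in _compile(inputs)) + "</form>"
-- ===== Notes on version B (the rewrite author's own statement) =====
-- stated objective: alternative
-- what changed: A interleaves branching and string concatenation in one accumulating pass; B is a two-stage pipeline that first compiles the spec into a flat intermediate representation of generic HTML elements (tag, attribute list, optional inner text, trailing text) and then renders every element with one generic attribute-list serializer, so no branch contains a format string.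
import Mathlib
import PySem

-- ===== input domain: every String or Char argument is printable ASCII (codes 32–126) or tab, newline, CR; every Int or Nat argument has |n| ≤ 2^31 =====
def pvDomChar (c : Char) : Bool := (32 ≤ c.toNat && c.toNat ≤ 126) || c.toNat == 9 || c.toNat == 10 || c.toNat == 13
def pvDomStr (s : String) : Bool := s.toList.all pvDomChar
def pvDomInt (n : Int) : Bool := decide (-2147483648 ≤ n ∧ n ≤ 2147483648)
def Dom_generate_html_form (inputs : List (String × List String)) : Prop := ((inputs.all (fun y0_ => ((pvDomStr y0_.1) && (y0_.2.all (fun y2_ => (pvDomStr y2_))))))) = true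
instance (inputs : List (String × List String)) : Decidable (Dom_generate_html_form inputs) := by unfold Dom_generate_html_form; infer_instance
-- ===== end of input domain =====

-- B replaces A's interleaved if/elif string accumulation by a two-stage pipeline: compile the
-- spec to a flat IR of generic HTML elements (tag, attrs, inner?, trail), then serialize with one generic element renderer (alternative decomposition, same cost).


-- ===== PORT A =====
-- hand port of str.capitalize (no PySem primitive): first char uppercased, rest lowered; exact on the ASCII domain
def pyCapitalize (s : String) : String :=
  match s.toList with
  | [] => ""
  | c :: cs => String.ofList (PySem.Chars.upperChar c :: PySem.Chars.lower cs)

def generate_html_form (inputs : List (String × List String)) : String :=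
  let html := "<form>\n"
  let html := inputs.foldl (fun html p =>
    let input_type := p.1
    let input_names := p.2
    if input_type == "text" then
      input_names.foldl (fun html name =>
        html ++ ("<label for=\"" ++ name ++ "\">" ++ pyCapitalize name ++ ":</label>\n")
             ++ ("<input type=\"text\" id=\"" ++ name ++ "\" name=\"" ++ name ++ "\"><br>\n")) html
    else if input_type == "password" then
      input_names.foldl (fun html name =>
        html ++ ("<label for=\"" ++ name ++ "\">" ++ pyCapitalize name ++ ":</label>\n")
             ++ ("<input type=\"password\" id=\"" ++ name ++ "\" name=\"" ++ name ++ "\"><br>\n")) html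
    else if input_type == "email" then
      input_names.foldl (fun html name =>
        html ++ ("<label for=\"" ++ name ++ "\">" ++ pyCapitalize name ++ ":</label>\n")
             ++ ("<input type=\"email\" id=\"" ++ name ++ "\" name=\"" ++ name ++ "\"><br>\n")) html
    else if input_type == "dropdown" then
      let html := html ++ "<label for=\"dropdown\">Choose a language:</label>\n"
      let html := html ++ "<select id=\"dropdown\" name=\"language\">\n"
      let html := input_names.foldl (fun html lang =>
        html ++ ("<option value=\"" ++ lang ++ "\">" ++ lang ++ "</option>\n")) html
      html ++ "</select><br>\n"
    else if input_type == "checkbox" then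
      input_names.foldl (fun html name =>
        html ++ ("<input type=\"checkbox\" id=\"" ++ name ++ "\" name=\"" ++ name ++ "\">\n")
             ++ ("<label for=\"" ++ name ++ "\">" ++ pyCapitalize name ++ "</label><br>\n")) html
    else if input_type == "datepicker" then
      input_names.foldl (fun html name =>
        html ++ ("<label for=\"" ++ name ++ "\">" ++ pyCapitalize name ++ ":</label>\n")
             ++ ("<input type=\"date\" id=\"" ++ name ++ "\" name=\"" ++ name ++ "\"><br>\n")) html
    else html) html
  html ++ "<input type=\"submit\" value=\"Submit\">\n</form>"

-- ===== PORT B =====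
-- an IR element of Source B: (tag, attribute list, optional inner text, trailing text)
abbrev PvEl := String × List (String × String) × Option String × String

-- _elem of Source B: the generic serializer
def pvElem (tag : String) (attrs : List (String × String)) (inner : Option String) (trail : String) : String :=
  let s := "<" ++ tag ++ PySem.Str.join "" (attrs.map (fun kv => " " ++ kv.1 ++ "=\"" ++ kv.2 ++ "\"")) ++ ">"
  let s := match inner with
    | some i => s ++ i ++ "</" ++ tag ++ ">"
    | none => s
  s ++ trail

-- the dict literal FIELD_TYPE of Source B
def pvFieldType : PySem.Dict String String :=
  PySem.Dict.mk [("text", "text"), ("password", "password"), ("email", "email"), ("datepicker", "date")]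

-- _compile of Source B ('t in FIELD_TYPE' + 'FIELD_TYPE[t]' fused into one get?)
def pvCompile (inputs : List (String × List String)) : List PvEl :=
  let els : List PvEl := []
  let els := inputs.foldl (fun els p =>
    let t := p.1
    let names := p.2
    match pvFieldType.get? t with
    | some ht =>
        names.foldl (fun els n =>
          els ++ [("label", [("for", n)], some (pyCapitalize n ++ ":"), "\n")]
              ++ [("input", [("type", ht), ("id", n), ("name", n)], none, "<br>\n")]) els
    | none =>
      if t == "dropdown" then
        let inner := "\n" ++ PySem.Str.join "" (names.map (fun l => pvElem "option" [("value", l)] (some l) "\n"))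
        els ++ [("label", [("for", "dropdown")], some "Choose a language:", "\n")]
            ++ [("select", [("id", "dropdown"), ("name", "language")], some inner, "<br>\n")]
      else if t == "checkbox" then
        names.foldl (fun els n =>
          els ++ [("input", [("type", "checkbox"), ("id", n), ("name", n)], none, "\n")]
              ++ [("label", [("for", n)], some (pyCapitalize n), "<br>\n")]) els
      else els) els
  els ++ [("input", [("type", "submit"), ("value", "Submit")], none, "\n")]

def generate_html_form_alt (inputs : List (String × List String)) : String :=
  "<form>\n"
    ++ PySem.Str.join "" ((pvCompile inputs).map (fun e => pvElem e.1 e.2.1 e.2.2.1 e.2.2.2))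
    ++ "</form>"

-- ===== PRECONDITION & SPEC =====
def Spec_generate_html_form (inputs : List (String × List String)) (out : String) : Prop := out = generate_html_form_alt inputs
instance (inputs : List (String × List String)) (out : String) : Decidable (Spec_generate_html_form inputs out) := by unfold Spec_generate_html_form; infer_instance

-- ===== CLAIM (what is proved, stated in full; the proofs are below) =====
def Claim_equal_generate_html_form : Prop := ∀ (inputs : List (String × List String)), Dom_generate_html_form inputs → Spec_generate_html_form inputs (generate_html_form inputs)

-- ===== LEMMAS AND PROOFS =====
theorem join0_nil : PySem.Str.join "" [] = "" := by
  apply String.toList_inj.mp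
  simp [PySem.Chars.join, List.intercalate]

theorem join0_cons (a : String) (l : List String) :
    PySem.Str.join "" (a :: l) = a ++ PySem.Str.join "" l := by
  apply String.toList_inj.mp
  simp [PySem.Chars.join, List.intercalate]
  cases l <;> simp

theorem join0_append (l₁ l₂ : List String) :
    PySem.Str.join "" (l₁ ++ l₂) = PySem.Str.join "" l₁ ++ PySem.Str.join "" l₂ := by
  induction l₁ with
  | nil => simp [join0_nil]
  | cons a l ih =>
      simp only [List.cons_append, join0_cons, ih, String.append_assoc]

-- the per-entry element list: what Source B's loop body appends for one (type, names) pair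
def pvElsOf (p : String × List String) : List PvEl :=
  match pvFieldType.get? p.1 with
  | some ht =>
      p.2.flatMap (fun n =>
        [("label", [("for", n)], some (pyCapitalize n ++ ":"), "\n"),
         ("input", [("type", ht), ("id", n), ("name", n)], none, "<br>\n")])
  | none =>
    if p.1 == "dropdown" then
      [("label", [("for", "dropdown")], some "Choose a language:", "\n"),
       ("select", [("id", "dropdown"), ("name", "language")],
        some ("\n" ++ PySem.Str.join "" (p.2.map (fun l => pvElem "option" [("value", l)] (some l) "\n"))), "<br>\n")]
    else if p.1 == "checkbox" then
      p.2.flatMap (fun n =>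
        [("input", [("type", "checkbox"), ("id", n), ("name", n)], none, "\n"),
         ("label", [("for", n)], some (pyCapitalize n), "<br>\n")])
    else []

theorem foldl_flat {α β : Type} (f : α → List β) :
    ∀ (l : List α) (acc : List β),
      l.foldl (fun a x => a ++ f x) acc = acc ++ l.flatMap f := by
  intro l
  induction l with
  | nil => intro acc; simp
  | cons a l ih => intro acc; simp [ih]

theorem pvCompile_eq (inputs : List (String × List String)) :
    pvCompile inputs = inputs.flatMap pvElsOf ++ [("input", [("type", "submit"), ("value", "Submit")], none, "\n")] := by
  have h : ∀ (l : List (String × List String)) (acc : List PvEl),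
      l.foldl (fun els p =>
        match pvFieldType.get? p.1 with
        | some ht =>
            p.2.foldl (fun els n =>
              els ++ [("label", [("for", n)], some (pyCapitalize n ++ ":"), "\n")]
                  ++ [("input", [("type", ht), ("id", n), ("name", n)], none, "<br>\n")]) els
        | none =>
          if p.1 == "dropdown" then
            els ++ [("label", [("for", "dropdown")], some ("Choose a language:"), "\n")]
                ++ [("select", [("id", "dropdown"), ("name", "language")],
                    some ("\n" ++ PySem.Str.join "" (p.2.map (fun l => pvElem "option" [("value", l)] (some l) "\n"))), "<br>\n")]
          else if p.1 == "checkbox" then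
            p.2.foldl (fun els n =>
              els ++ [("input", [("type", "checkbox"), ("id", n), ("name", n)], none, "\n")]
                  ++ [("label", [("for", n)], some (pyCapitalize n), "<br>\n")]) els
          else els) acc = acc ++ l.flatMap pvElsOf := by
    intro l
    induction l with
    | nil => intro acc; simp
    | cons p l ih =>
        intro acc
        rw [List.foldl_cons, ih, List.flatMap_cons, ← List.append_assoc]
        congr 1
        unfold pvElsOf
        cases pvFieldType.get? p.1 with
        | some ht =>
            simp only
            rw [show (fun (els : List PvEl) n =>
              els ++ [("label", [("for", n)], some (pyCapitalize n ++ ":"), "\n")]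
                  ++ [("input", [("type", ht), ("id", n), ("name", n)], none, "<br>\n")]) =
              (fun els n => els ++ ([("label", [("for", n)], some (pyCapitalize n ++ ":"), "\n"),
                ("input", [("type", ht), ("id", n), ("name", n)], none, "<br>\n")] : List PvEl)) from by
                funext els n; simp, foldl_flat]
        | none =>
            simp only
            split_ifs with h1 h2
            · simp
            · rw [show (fun (els : List PvEl) n =>
                els ++ [("input", [("type", "checkbox"), ("id", n), ("name", n)], none, "\n")]
                    ++ [("label", [("for", n)], some (pyCapitalize n), "<br>\n")]) =
                (fun els n => els ++ ([("input", [("type", "checkbox"), ("id", n), ("name", n)], none, "\n"),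
                  ("label", [("for", n)], some (pyCapitalize n), "<br>\n")] : List PvEl)) from by
                  funext els n; simp, foldl_flat]
            · simp
  exact congrArg (· ++ [(("input" : String), [(("type" : String), ("submit" : String)), ("value", "Submit")], (none : Option String), ("\n" : String))]) ((h inputs []).trans (List.nil_append _))

-- serializer of one element, as Source B maps it
def pvSer (e : PvEl) : String := pvElem e.1 e.2.1 e.2.2.1 e.2.2.2

-- 'for n in l: html += f(n); html += g(n)' accumulates the joined fragments
theorem foldl_app2 (f g : String → String) :
    ∀ (l : List String) (h : String),
      l.foldl (fun h n => h ++ f n ++ g n) h = h ++ PySem.Str.join "" (l.map fun n => f n ++ g n) := by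
  intro l
  induction l with
  | nil => intro h; simp [join0_nil]
  | cons a l ih =>
      intro h
      rw [List.foldl_cons, ih, List.map_cons, join0_cons]
      simp [String.append_assoc]

theorem foldl_app1 (f : String → String) :
    ∀ (l : List String) (h : String),
      l.foldl (fun h n => h ++ f n) h = h ++ PySem.Str.join "" (l.map f) := by
  intro l
  induction l with
  | nil => intro h; simp [join0_nil]
  | cons a l ih =>
      intro h
      rw [List.foldl_cons, ih, List.map_cons, join0_cons]
      simp [String.append_assoc]

-- join over a flatMap of two-element lists = join of pairwise concatenations
theorem join0_pair {α : Type} (f g : α → String) (l : List α) :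
    PySem.Str.join "" ((l.flatMap fun n => [f n, g n])) = PySem.Str.join "" (l.map fun n => f n ++ g n) := by
  induction l with
  | nil => simp
  | cons a l ih =>
      simp only [List.flatMap_cons, List.map_cons, List.cons_append, join0_cons, join0_append, ih]
      simp [join0_nil, String.append_assoc]

theorem foldl_out (step : String → (String × List String) → String)
    (g : String × List String → List String)
    (hstep : ∀ h p, step h p = h ++ PySem.Str.join "" (g p)) :
    ∀ (l : List (String × List String)) (h : String),
      l.foldl step h = h ++ PySem.Str.join "" (l.flatMap g) := by
  intro l
  induction l with
  | nil => intro h; simp [join0_nil]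
  | cons p l ih =>
      intro h
      simp only [List.foldl_cons, ih, hstep, List.flatMap_cons, join0_append, String.append_assoc]

theorem get?_mk_nil (x : String) : (PySem.Dict.mk ([] : List (String × String))).get? x = none := rfl

set_option maxHeartbeats 1000000 in
-- one entry of A's loop body equals 'append the serialized IR of that entry'
theorem aStep (t : String) (ns : List String) (h : String) :
    (if t == "text" then
      ns.foldl (fun html name =>
        html ++ ("<label for=\"" ++ name ++ "\">" ++ pyCapitalize name ++ ":</label>\n")
             ++ ("<input type=\"text\" id=\"" ++ name ++ "\" name=\"" ++ name ++ "\"><br>\n")) h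
    else if t == "password" then
      ns.foldl (fun html name =>
        html ++ ("<label for=\"" ++ name ++ "\">" ++ pyCapitalize name ++ ":</label>\n")
             ++ ("<input type=\"password\" id=\"" ++ name ++ "\" name=\"" ++ name ++ "\"><br>\n")) h
    else if t == "email" then
      ns.foldl (fun html name =>
        html ++ ("<label for=\"" ++ name ++ "\">" ++ pyCapitalize name ++ ":</label>\n")
             ++ ("<input type=\"email\" id=\"" ++ name ++ "\" name=\"" ++ name ++ "\"><br>\n")) h
    else if t == "dropdown" then
      (ns.foldl (fun html lang =>
        html ++ ("<option value=\"" ++ lang ++ "\">" ++ lang ++ "</option>\n"))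
        ((h ++ "<label for=\"dropdown\">Choose a language:</label>\n")
          ++ "<select id=\"dropdown\" name=\"language\">\n")) ++ "</select><br>\n"
    else if t == "checkbox" then
      ns.foldl (fun html name =>
        html ++ ("<input type=\"checkbox\" id=\"" ++ name ++ "\" name=\"" ++ name ++ "\">\n")
             ++ ("<label for=\"" ++ name ++ "\">" ++ pyCapitalize name ++ "</label><br>\n")) h
    else if t == "datepicker" then
      ns.foldl (fun html name =>
        html ++ ("<label for=\"" ++ name ++ "\">" ++ pyCapitalize name ++ ":</label>\n")
             ++ ("<input type=\"date\" id=\"" ++ name ++ "\" name=\"" ++ name ++ "\"><br>\n")) h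
    else h) = h ++ PySem.Str.join "" ((pvElsOf (t, ns)).map pvSer) := by
  by_cases h1 : t = "text"
  · subst h1
    simp only [pvElsOf, pvFieldType, PySem.Dict.get?_mk_cons, String.reduceBEq, if_true, if_false,
      Bool.false_eq_true, get?_mk_nil, List.map_flatMap, List.map_cons, List.map_nil]
    rw [foldl_app2, join0_pair]
    apply congrArg (fun s => h ++ s)
    apply congrArg (PySem.Str.join "")
    rw [List.map_inj_left]
    intro n _
    apply String.toList_inj.mp
    simp [pvSer, pvElem, join0_cons, join0_nil]
  · by_cases h2 : t = "password"
    · subst h2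
      simp only [pvElsOf, pvFieldType, PySem.Dict.get?_mk_cons, String.reduceBEq, if_true, if_false,
        Bool.false_eq_true, get?_mk_nil, List.map_flatMap, List.map_cons, List.map_nil]
      rw [foldl_app2, join0_pair]
      apply congrArg (fun s => h ++ s)
      apply congrArg (PySem.Str.join "")
      rw [List.map_inj_left]
      intro n _
      apply String.toList_inj.mp
      simp [pvSer, pvElem, join0_cons, join0_nil]
    · by_cases h3 : t = "email"
      · subst h3
        simp only [pvElsOf, pvFieldType, PySem.Dict.get?_mk_cons, String.reduceBEq, if_true, if_false,
          Bool.false_eq_true, get?_mk_nil, List.map_flatMap, List.map_cons, List.map_nil]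
        rw [foldl_app2, join0_pair]
        apply congrArg (fun s => h ++ s)
        apply congrArg (PySem.Str.join "")
        rw [List.map_inj_left]
        intro n _
        apply String.toList_inj.mp
        simp [pvSer, pvElem, join0_cons, join0_nil]
      · by_cases h4 : t = "dropdown"
        · subst h4
          simp only [pvElsOf, pvFieldType, PySem.Dict.get?_mk_cons, String.reduceBEq, if_true, if_false,
            Bool.false_eq_true, get?_mk_nil]
          rw [foldl_app1]
          have hopt : (ns.map fun lang => "<option value=\"" ++ lang ++ "\">" ++ lang ++ "</option>\n")
              = ns.map fun l => pvElem "option" [("value", l)] (some l) "\n" := by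
            rw [List.map_inj_left]
            intro l _
            apply String.toList_inj.mp
            simp [pvElem, join0_cons, join0_nil]
          simp only [List.map_cons, List.map_nil, join0_cons, join0_nil, hopt]
          apply String.toList_inj.mp
          simp [pvSer, pvElem, join0_cons, join0_nil, String.append_assoc]
        · by_cases h5 : t = "checkbox"
          · subst h5
            simp only [pvElsOf, pvFieldType, PySem.Dict.get?_mk_cons, String.reduceBEq, if_true, if_false,
              Bool.false_eq_true, get?_mk_nil, List.map_flatMap, List.map_cons, List.map_nil]
            rw [foldl_app2, join0_pair]
            apply congrArg (fun s => h ++ s)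
            apply congrArg (PySem.Str.join "")
            rw [List.map_inj_left]
            intro n _
            apply String.toList_inj.mp
            simp [pvSer, pvElem, join0_cons, join0_nil]
          · by_cases h6 : t = "datepicker"
            · subst h6
              simp only [pvElsOf, pvFieldType, PySem.Dict.get?_mk_cons, String.reduceBEq, if_true, if_false,
                Bool.false_eq_true, get?_mk_nil, List.map_flatMap, List.map_cons, List.map_nil]
              rw [foldl_app2, join0_pair]
              apply congrArg (fun s => h ++ s)
              apply congrArg (PySem.Str.join "")
              rw [List.map_inj_left]
              intro n _
              apply String.toList_inj.mp
              simp [pvSer, pvElem, join0_cons, join0_nil]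
            · simp only [pvElsOf, pvFieldType, PySem.Dict.get?_mk_cons]
              simp [h1, h2, h3, h4, h5, h6, Ne.symm h1, Ne.symm h2, Ne.symm h3,
                Ne.symm h6, get?_mk_nil, join0_nil]

-- ===== VERDICT (by name: the statement is the Claim_ definition above) =====
theorem generate_html_form_spec : Claim_equal_generate_html_form := by
  intro inputs _
  unfold Spec_generate_html_form
  simp only [generate_html_form, generate_html_form_alt]
  rw [foldl_out _ (fun p => (pvElsOf p).map pvSer) (fun h p => aStep p.1 p.2 h), pvCompile_eq,
    List.map_append, join0_append]
  have hsub : PySem.Str.join "" (([("input", [("type", "submit"), ("value", "Submit")], none, "\n")] : List PvEl).map (fun e => pvElem e.1 e.2.1 e.2.2.1 e.2.2.2)) = "<input type=\"submit\" value=\"Submit\">\n" := by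
    apply String.toList_inj.mp
    simp [pvElem, join0_cons, join0_nil]
  rw [hsub, List.map_flatMap]
  have hser : pvSer = fun e => pvElem e.1 e.2.1 e.2.2.1 e.2.2.2 := rfl
  rw [hser]
  apply String.toList_inj.mp
  simp [String.append_assoc]
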